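-- pv_equiv track=rewrite | github.com/navya19j/COL764-Assignments | Assignment-1/invidx_cons.py | c1_encode
-- ===== SOURCE A (Python) =====
-- def conv_num_to_binary(num):
--
--     return "{0:b}".format(num)
--
-- def c1_encode(data):
--
--     data_length = data.bit_length()
--     mask = (1<<7)-1
--     temp = ""
--     j = int(data_length/7)+1
--     while (data!=0):
--
--         ans = data & mask
--         res = str(conv_num_to_binary(ans))
--         res = res.zfill(7)
--
--         if (j==int(data_length/7)+1):
--             res = res.zfill(8)
--             j=j-1
--         else:
--             res = "1" + res
--
--         temp = res + temp
--         data = data >> 7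
--
--     return temp
-- ===== SOURCE B (Python) =====
-- def c1_encode(data):
--     if data == 0:
--         return ""
--     bits = format(data, "b")
--     pad = (-len(bits)) % 7
--     bits = "0" * pad + bits
--     chunks = [bits[i:i + 7] for i in range(0, len(bits), 7)]
--     return "".join("1" + c for c in chunks[:-1]) + "0" + chunks[-1]
-- ===== Notes on version B (the rewrite author's own statement) =====
-- stated objective: simpler
-- what changed: Replaces A's mask/shift loop that extracts 7-bit groups arithmetically and prepends them (with a j-counter tracking the first iteration) by a single string computation: format the number in binary once, zero-pad to a multiple of 7, slice into 7-char chunks and join them with a 1/0 continuation prefix.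
import Mathlib
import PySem

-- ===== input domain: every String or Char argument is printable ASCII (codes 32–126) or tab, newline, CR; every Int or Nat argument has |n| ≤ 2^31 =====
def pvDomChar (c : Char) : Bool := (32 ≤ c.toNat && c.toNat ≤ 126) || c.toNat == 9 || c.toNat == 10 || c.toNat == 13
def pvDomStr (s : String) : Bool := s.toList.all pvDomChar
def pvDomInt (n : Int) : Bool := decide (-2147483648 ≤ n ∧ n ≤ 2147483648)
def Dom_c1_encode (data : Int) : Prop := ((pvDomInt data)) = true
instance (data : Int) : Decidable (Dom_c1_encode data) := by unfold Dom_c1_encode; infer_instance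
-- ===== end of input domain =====

-- B replaces A's mask/shift extract-and-prepend loop by formatting the number in binary once,
-- zero-padding to a multiple of 7 and slicing 7-char chunks with a 1/0 continuation prefix (simpler).


-- ===== PORT A =====
-- the while loop, one step per iteration; fuel data.natAbs + 1 is enough for every data ≥ 0
-- (each step replaces data by data >> 7); Python diverges for data < 0, excluded by Pre_.
def c1A_loop : Nat → Nat → Int → Int → List Char → List Char
  | 0, _, _, _, temp => temp
  | fuel + 1, dl, j, data, temp =>
    if data = 0 then temp
    else
      let mask : Int := (1 <<< 7) - 1
      let ans := PySem.Int.band data mask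
      let res := PySem.Chars.zfill (PySem.Int.toBinChars ans) 7
      if j = ((dl / 7 : Nat) : Int) + 1 then
        c1A_loop fuel dl (j - 1) (data >>> 7) (PySem.Chars.zfill res 8 ++ temp)
      else
        c1A_loop fuel dl j (data >>> 7) (('1' :: res) ++ temp)

def c1_encode (data : Int) : String :=
  let dl := PySem.Int.bitLength data
  String.ofList (c1A_loop (data.natAbs + 1) dl (((dl / 7 : Nat) : Int) + 1) data [])

-- ===== PORT B =====
def c1_encode_alt (data : Int) : String :=
  if data = 0 then ""
  else
    let bits := PySem.Int.toBinChars data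
    let pad := PySem.Int.mod (-(bits.length : Int)) 7
    let bits := PySem.List.pyRepeat ['0'] pad ++ bits
    let chunks := (PySem.List.pyRange 0 (bits.length : Int) 7).map
      (fun i => PySem.List.slice bits (some i) (some (i + 7)))
    -- chunks[-1]: the IndexError is unreachable (chunks ≠ [] since data ≠ 0), so .getD [] is exact
    String.ofList (PySem.Chars.join [] ((PySem.List.slice chunks none (some (-1))).map (fun c => '1' :: c))
      ++ '0' :: (PySem.List.pyGet? chunks (-1)).getD [])

-- ===== PRECONDITION & SPEC =====
-- Pre_ excludes data < 0, on which A's while loop never terminates (data >> 7 stays negative).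
def Pre_c1_encode (data : Int) : Prop := 0 ≤ data
instance (data : Int) : Decidable (Pre_c1_encode data) := by unfold Pre_c1_encode; infer_instance
def pvWitness_c1_encode : Int := (300)

def Spec_c1_encode (data : Int) (out : String) : Prop := out = c1_encode_alt data
instance (data : Int) (out : String) : Decidable (Spec_c1_encode data out) := by unfold Spec_c1_encode; infer_instance

-- ===== CLAIM (what is proved, stated in full; the proofs are below) =====
def Claim_equal_c1_encode : Prop := ∀ (data : Int), Dom_c1_encode data → Pre_c1_encode data → Spec_c1_encode data (c1_encode data)

-- ===== LEMMAS AND PROOFS =====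

-- `Nat.toDigits 2` (what PySem.Int.toBinChars computes on nonnegatives) satisfies the halving recursion.
theorem toDigitsCore_acc (f n : Nat) (ds : List Char) :
    Nat.toDigitsCore 2 f n ds = Nat.toDigitsCore 2 f n [] ++ ds := by
  induction f generalizing n ds with
  | zero => simp [Nat.toDigitsCore]
  | succ f ih =>
    simp only [Nat.toDigitsCore]
    by_cases h : n / 2 = 0
    · simp [h]
    · simp only [h, if_false]
      rw [ih (n / 2) ((n % 2).digitChar :: ds), ih (n / 2) [(n % 2).digitChar]]
      simp

theorem toDigitsCore_fuel (f f' n : Nat) (hf : n < 2 ^ f) (hf' : n < 2 ^ f')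
    (h1 : 0 < f) (h2 : 0 < f') :
    Nat.toDigitsCore 2 f n [] = Nat.toDigitsCore 2 f' n [] := by
  induction n using Nat.strong_induction_on generalizing f f' with
  | _ n ih =>
    obtain ⟨f, rfl⟩ := Nat.exists_eq_succ_of_ne_zero (Nat.pos_iff_ne_zero.mp h1)
    obtain ⟨f', rfl⟩ := Nat.exists_eq_succ_of_ne_zero (Nat.pos_iff_ne_zero.mp h2)
    simp only [Nat.toDigitsCore]
    by_cases h : n / 2 = 0
    · simp [h]
    · simp only [h, if_false]
      rw [toDigitsCore_acc f, toDigitsCore_acc f']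
      have hlt : n / 2 < n := Nat.div_lt_self (by omega) (by omega)
      have hfp : 0 < f := by
        by_contra hc
        have : f = 0 := by omega
        subst this; simp at hf; omega
      have hfp' : 0 < f' := by
        by_contra hc
        have : f' = 0 := by omega
        subst this; simp at hf'; omega
      have h2f : n / 2 < 2 ^ f := by
        rw [Nat.div_lt_iff_lt_mul (by omega)]
        calc n < 2 ^ (f + 1) := hf
          _ = 2 ^ f * 2 := by ring
      have h2f' : n / 2 < 2 ^ f' := by
        rw [Nat.div_lt_iff_lt_mul (by omega)]
        calc n < 2 ^ (f' + 1) := hf'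
          _ = 2 ^ f' * 2 := by ring
      rw [ih (n / 2) hlt f f' h2f h2f' hfp hfp']

theorem toDigits_step (n : Nat) (h : 2 ≤ n) :
    Nat.toDigits 2 n = Nat.toDigits 2 (n / 2) ++ [Nat.digitChar (n % 2)] := by
  have hne : n / 2 ≠ 0 := by omega
  show Nat.toDigitsCore 2 (n + 1) n [] = Nat.toDigitsCore 2 (n / 2 + 1) (n / 2) [] ++ _
  have hstep : Nat.toDigitsCore 2 (n + 1) n [] = Nat.toDigitsCore 2 n (n / 2) [(n % 2).digitChar] := by
    simp [Nat.toDigitsCore, hne]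
  rw [hstep, toDigitsCore_acc,
    toDigitsCore_fuel n (n / 2 + 1) (n / 2)
      (lt_of_le_of_lt (by omega) (Nat.lt_two_pow_self))
      (lt_of_le_of_lt (by omega) (Nat.lt_two_pow_self)) (by omega) (by omega)]

-- helpers for the common spec
def pad7 (k : Nat) : List Char := PySem.Chars.zfill (Nat.toDigits 2 k) 7

def refA1 (n : Nat) : List Char :=
  if _h : n = 0 then [] else refA1 (n / 128) ++ '1' :: pad7 (n % 128)
  decreasing_by exact Nat.div_lt_self (by omega) (by omega)

def refA (n : Nat) : List Char :=
  if n = 0 then [] else refA1 (n / 128) ++ '0' :: pad7 (n % 128)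

theorem pad7_digits : ∀ k, k < 128 → pad7 k =
    [(k / 64 % 2).digitChar, (k / 32 % 2).digitChar, (k / 16 % 2).digitChar, (k / 8 % 2).digitChar,
     (k / 4 % 2).digitChar, (k / 2 % 2).digitChar, (k % 2).digitChar] := by decide

theorem split7 (n : Nat) (h : 128 ≤ n) :
    Nat.toDigits 2 n = Nat.toDigits 2 (n / 128) ++ pad7 (n % 128) := by
  have l0 := toDigits_step n (by omega)
  have l1 := toDigits_step (n / 2) (by omega)
  have l2 := toDigits_step (n / 4) (by omega)
  have l3 := toDigits_step (n / 8) (by omega)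
  have l4 := toDigits_step (n / 16) (by omega)
  have l5 := toDigits_step (n / 32) (by omega)
  have l6 := toDigits_step (n / 64) (by omega)
  rw [Nat.div_div_eq_div_mul] at l1 l2 l3 l4 l5 l6
  norm_num at l1 l2 l3 l4 l5 l6
  rw [l0, l1, l2, l3, l4, l5, l6, pad7_digits (n % 128) (by omega)]
  have d0 : n % 128 % 2 = n % 2 := by omega
  have d1 : n % 128 / 2 % 2 = n / 2 % 2 := by omega
  have d2 : n % 128 / 4 % 2 = n / 4 % 2 := by omega
  have d3 : n % 128 / 8 % 2 = n / 8 % 2 := by omega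
  have d4 : n % 128 / 16 % 2 = n / 16 % 2 := by omega
  have d5 : n % 128 / 32 % 2 = n / 32 % 2 := by omega
  have d6 : n % 128 / 64 % 2 = n / 64 % 2 := by omega
  rw [d0, d1, d2, d3, d4, d5, d6]
  simp

theorem pad7_zfill8 : ∀ k, k < 128 → PySem.Chars.zfill (pad7 k) 8 = '0' :: pad7 k := by decide

theorem shiftcast (n : Nat) : (↑n : Int) >>> (7 : Int) = ↑(n / 128) := by
  have h : (↑n : Int) >>> (7 : Int) = (↑n : Int) >>> ((7 : Int).toNat) := rfl
  rw [h, Int.shiftRight_eq_div_pow, ← Int.natCast_ediv]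
  norm_num [Int.toNat]

theorem bandcast (n : Nat) :
    PySem.Int.band (↑n) ((1 <<< 7) - 1) = ((n % 128 : Nat) : Int) := by
  have hm : ((1 <<< 7 : Int)) - 1 = ((127 : Nat) : Int) := by decide
  rw [hm, PySem.Int.band_natCast]
  exact_mod_cast congrArg (Nat.cast (R := Int)) (Nat.and_two_pow_sub_one_eq_mod n 7)

theorem bincast (m : Nat) : PySem.Int.toBinChars ((m : Nat) : Int) = Nat.toDigits 2 m := by
  simp [PySem.Int.toBinChars]

theorem c1A_loop_cont (fuel dl : Nat) (j : Int) (n : Nat) (temp : List Char)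
    (hj : j ≠ ((dl / 7 : Nat) : Int) + 1) (hfuel : n < fuel) :
    c1A_loop fuel dl j (↑n) temp = refA1 n ++ temp := by
  induction fuel generalizing n temp with
  | zero => omega
  | succ fuel ih =>
    by_cases h0 : n = 0
    · subst h0
      simp [c1A_loop, refA1]
    · have hc : (↑n : Int) ≠ 0 := by exact_mod_cast h0
      have hdiv : n / 128 < n := Nat.div_lt_self (by omega) (by omega)
      simp only [c1A_loop, if_neg hc, if_neg hj, bandcast, bincast, shiftcast]
      rw [ih (n / 128) _ (by omega)]
      conv_rhs => rw [refA1]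
      simp [h0, pad7]

theorem c1A_loop_first (fuel dl : Nat) (n : Nat) (temp : List Char) (hfuel : n < fuel) :
    c1A_loop fuel dl (((dl / 7 : Nat) : Int) + 1) (↑n) temp = refA n ++ temp := by
  obtain ⟨fuel, rfl⟩ := Nat.exists_eq_succ_of_ne_zero (by omega : fuel ≠ 0)
  by_cases h0 : n = 0
  · subst h0
    simp [c1A_loop, refA]
  · have hc : (↑n : Int) ≠ 0 := by exact_mod_cast h0
    have hdiv : n / 128 < n := Nat.div_lt_self (by omega) (by omega)
    simp only [c1A_loop, if_neg hc, bandcast, bincast, shiftcast]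
    have hz := pad7_zfill8 (n % 128) (by omega)
    rw [show (((dl / 7 : Nat) : Int) + 1 - 1) = ((dl / 7 : Nat) : Int) by ring]
    rw [c1A_loop_cont fuel dl _ (n / 128) _ (by omega) (by omega)]
    unfold refA
    rw [if_neg h0]
    simp only [pad7] at hz ⊢
    rw [hz]
    simp

theorem c1_encode_eq_refA (n : Nat) : c1_encode (↑n) = String.ofList (refA n) := by
  show String.ofList (c1A_loop ((n : Int).natAbs + 1) (PySem.Int.bitLength ↑n)
    (((PySem.Int.bitLength (↑n : Int) / 7 : Nat) : Int) + 1) (↑n) []) = _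
  rw [show ((n : Int).natAbs + 1) = n + 1 by simp,
    c1A_loop_first (n + 1) _ n [] (by omega)]
  simp

-- B side: the 7-char chunking of the padded binary string
def chunks7 : Nat → List Char → List (List Char)
  | 0, _ => []
  | c + 1, cs => cs.take 7 :: chunks7 c (cs.drop 7)

def paddedB (n : Nat) : List Char :=
  List.replicate ((7 - (Nat.toDigits 2 n).length % 7) % 7) '0' ++ Nat.toDigits 2 n

def chunksOf (n : Nat) : List (List Char) :=
  chunks7 (((Nat.toDigits 2 n).length + 6) / 7) (paddedB n)

theorem join_empty_sep (l : List (List Char)) : PySem.Chars.join [] l = l.flatten := by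
  induction l with
  | nil => simp [PySem.Chars.join_nil]
  | cons a t ih =>
    cases t with
    | nil => simp [PySem.Chars.join_singleton]
    | cons b r =>
      rw [PySem.Chars.join_cons_cons, ih]
      simp

theorem range_map_chunks (C : Nat) (cs : List Char) :
    (List.range C).map (fun k => (cs.drop (7 * k)).take 7) = chunks7 C cs := by
  induction C generalizing cs with
  | zero => simp [chunks7]
  | succ C ih =>
    rw [List.range_succ_eq_map, chunks7]
    simp only [List.map_cons, List.map_map]
    congr 1
    rw [← ih (cs.drop 7)]
    apply List.map_congr_left
    intro k _
    simp only [Function.comp, List.drop_drop]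
    congr 2
    omega

theorem pyRange_chunks (cs : List Char) (C : Nat) (h : cs.length = 7 * C) :
    (PySem.List.pyRange 0 (cs.length : Int) 7).map
      (fun i => PySem.List.slice cs (some i) (some (i + 7))) = chunks7 C cs := by
  unfold PySem.List.pyRange
  rw [if_neg (by omega : (7:Int) ≠ 0), if_pos (by omega : (0:Int) < 7)]
  by_cases hC : C = 0
  · subst hC
    rw [if_neg (by simp [h])]
    simp [chunks7]
  · rw [if_pos (by rw [h]; push_cast; omega)]
    have hcount : (((cs.length : Int) - 0 + 7 - 1) / 7).toNat = C := by
      rw [h]; push_cast; omega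
    rw [hcount, List.map_map]
    rw [← range_map_chunks C cs]
    apply List.map_congr_left
    intro k _
    have : ((0 : Int) + 7 * ↑k) = ((7 * k : Nat) : Int) := by push_cast; ring
    simp only [Function.comp, this]
    have h7 : ((7 * k : Nat) : Int) + 7 = ((7 * k : Nat) : Int) + ((7 : Nat) : Int) := by norm_num
    rw [h7, PySem.List.slice_natCast_add]

theorem chunks7_append (c : Nat) (P Q : List Char) (hP : P.length = 7 * c) (hQ : Q.length = 7) :
    chunks7 (c + 1) (P ++ Q) = chunks7 c P ++ [Q] := by
  induction c generalizing P with
  | zero =>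
    have : P = [] := List.eq_nil_of_length_eq_zero (by omega)
    subst this
    simp [chunks7, List.take_of_length_le (by omega : Q.length ≤ 7)]
  | succ c ih =>
    have h7 : 7 ≤ P.length := by omega
    rw [chunks7, List.take_append_of_le_length h7, List.drop_append_of_le_length h7,
      ih (P.drop 7) (by simp [List.length_drop]; omega)]
    rw [chunks7]
    simp

theorem pad7_len : ∀ k, k < 128 → (pad7 k).length = 7 := by decide

theorem chunksOf_small : ∀ k, k < 128 → 1 ≤ k → chunksOf k = [pad7 k] := by decide

theorem chunksOf_step (n : Nat) (h : 128 ≤ n) :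
    chunksOf n = chunksOf (n / 128) ++ [pad7 (n % 128)] := by
  have hs := split7 n h
  have hlen : (Nat.toDigits 2 n).length = (Nat.toDigits 2 (n / 128)).length + 7 := by
    rw [hs]
    simp [pad7_len (n % 128) (by omega)]
  unfold chunksOf paddedB
  rw [hlen, hs]
  rw [show (7 - ((Nat.toDigits 2 (n / 128)).length + 7) % 7) % 7
      = (7 - (Nat.toDigits 2 (n / 128)).length % 7) % 7 by omega]
  rw [show ((Nat.toDigits 2 (n / 128)).length + 7 + 6) / 7
      = ((Nat.toDigits 2 (n / 128)).length + 6) / 7 + 1 by omega]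
  rw [← List.append_assoc]
  exact chunks7_append _ _ _ (by simp; omega) (pad7_len (n % 128) (by omega))

theorem chunks_to_refA1 (n : Nat) (h1 : 1 ≤ n) :
    PySem.Chars.join [] ((chunksOf n).map (fun c => '1' :: c)) = refA1 n := by
  induction n using Nat.strong_induction_on with
  | _ n ih =>
    by_cases h : n < 128
    · rw [chunksOf_small n h h1, refA1]
      rw [dif_neg (by omega : ¬ n = 0)]
      rw [show n / 128 = 0 by omega, refA1, show n % 128 = n by omega]
      simp [PySem.Chars.join_singleton]
    · rw [chunksOf_step n (by omega), refA1, dif_neg (by omega : ¬ n = 0)]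
      rw [List.map_append, join_empty_sep, List.flatten_append,
        ← join_empty_sep ((chunksOf (n / 128)).map (fun c => '1' :: c)),
        ih (n / 128) (Nat.div_lt_self (by omega) (by omega)) (by omega)]
      simp

theorem chunks_to_refA (n : Nat) (h1 : 1 ≤ n) :
    PySem.Chars.join [] ((chunksOf n).dropLast.map (fun c => '1' :: c))
      ++ '0' :: ((chunksOf n).getLast?.getD []) = refA n := by
  by_cases h : n < 128
  · rw [chunksOf_small n h h1, refA, if_neg (by omega : ¬ n = 0),
      show n / 128 = 0 by omega, refA1, show n % 128 = n by omega]
    simp [PySem.Chars.join_nil]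
  · rw [chunksOf_step n (by omega), List.dropLast_concat, List.getLast?_concat,
      chunks_to_refA1 (n / 128) (by omega), refA, if_neg (by omega : ¬ n = 0)]
    simp

theorem padcast (L : Nat) : (PySem.Int.mod (-(L : Int)) 7).toNat = (7 - L % 7) % 7 := by
  rw [PySem.Int.mod_eq_emod_of_pos (by omega)]
  omega

theorem c1_alt_eq_refA (n : Nat) : c1_encode_alt (↑n) = String.ofList (refA n) := by
  by_cases h0 : n = 0
  · subst h0
    rw [show c1_encode_alt ((0 : Nat) : Int) = "" by rfl, refA]
    rfl
  · have hc : ((n : Nat) : Int) ≠ 0 := by exact_mod_cast h0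
    show (if ((n : Nat) : Int) = 0 then "" else _) = _
    rw [if_neg hc]
    simp only [bincast, PySem.List.pyRepeat_singleton, padcast]
    have hbits : List.replicate ((7 - (Nat.toDigits 2 n).length % 7) % 7) '0'
        ++ Nat.toDigits 2 n = paddedB n := rfl
    rw [hbits]
    have hlen : (paddedB n).length = 7 * (((Nat.toDigits 2 n).length + 6) / 7) := by
      simp only [paddedB, List.length_append, List.length_replicate]
      omega
    rw [pyRange_chunks (paddedB n) _ hlen]
    rw [PySem.List.slice_to_neg_one, PySem.List.pyGet?_neg_one]
    rw [show chunks7 (((Nat.toDigits 2 n).length + 6) / 7) (paddedB n) = chunksOf n from rfl]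
    rw [chunks_to_refA n (by omega)]

-- ===== VERDICT (by name: the statement is the Claim_ definition above) =====
theorem c1_encode_spec : Claim_equal_c1_encode := by
  intro data _ hpre
  unfold Spec_c1_encode
  have hn : data = ((data.toNat : Nat) : Int) := (Int.toNat_of_nonneg hpre).symm
  rw [hn, c1_encode_eq_refA, c1_alt_eq_refA]
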